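-- pv_equiv track=rewrite | github.com/AgileWorksZA/codeqa | tests/test_files/linting_sample.py | complex_function
-- ===== SOURCE A (Python) =====
-- def complex_function(n):
--     result = 0
--     for i in range(n):
--         if i % 2 == 0:
--             if i % 3 == 0:
--                 result += i * 3
--             else:
--                 result += i * 2
--         elif i % 3 == 0:
--             if i % 5 == 0:
--                 result += i * 5
--             else:
--                 result += i * 3
--         elif i % 5 == 0:
--             result += i * 5
--         elif i % 7 == 0:
--             result += i * 7
--         else:
--             result += 1
--     return result
-- ===== SOURCE B (Python) =====
-- def _term(res):
--     # (coefficient, addend) of the branch taken at any i with i % 210 == res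
--     if res % 2 == 0:
--         return (3, 0) if res % 3 == 0 else (2, 0)
--     elif res % 3 == 0:
--         return (5, 0) if res % 5 == 0 else (3, 0)
--     elif res % 5 == 0:
--         return (5, 0)
--     elif res % 7 == 0:
--         return (7, 0)
--     else:
--         return (0, 1)
--
--
-- def _class_total(q, r, res):
--     # total contribution of all i < n (n = 210*q + r) with i % 210 == res
--     c, add = _term(res)
--     k = q + (1 if res < r else 0)          # how many such i
--     return c * (k * res + 210 * (k * (k - 1) // 2)) + add * k
--
--
-- def complex_function(n):
--     # O(1): the branch taken depends only on i % 210 (210 = lcm(2,3,5,7)),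
--     # so sum each residue class as a closed-form arithmetic series.
--     if n <= 0:
--         return 0
--     q, r = divmod(n, 210)
--     total = 0
--     for res in range(210):
--         total += _class_total(q, r, res)
--     return total
-- ===== Notes on version B (the rewrite author's own statement) =====
-- stated objective: faster
-- what changed: Replaces the O(n) loop over range(n) by a closed-form arithmetic-series sum over the 210 residue classes mod lcm(2,3,5,7)=210, since the branch taken depends only on i % 210.
import Mathlib
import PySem

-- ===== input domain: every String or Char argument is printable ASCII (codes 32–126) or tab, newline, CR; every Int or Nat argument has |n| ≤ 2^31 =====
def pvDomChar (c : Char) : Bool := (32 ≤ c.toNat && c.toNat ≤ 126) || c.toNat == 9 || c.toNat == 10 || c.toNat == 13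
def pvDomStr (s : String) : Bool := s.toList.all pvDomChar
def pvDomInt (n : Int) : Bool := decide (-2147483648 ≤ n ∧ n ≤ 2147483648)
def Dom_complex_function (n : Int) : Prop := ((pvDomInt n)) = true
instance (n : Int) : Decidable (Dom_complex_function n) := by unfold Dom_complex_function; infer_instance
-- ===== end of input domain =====

-- B is O(1) where A is O(n): the branch depends only on i % 210, so B sums each
-- residue class mod 210 = lcm(2,3,5,7) as a closed-form arithmetic series.

-- ===== PORT A =====
def complex_function (n : Int) : Int :=
  (PySem.List.pyRange 0 n 1).foldl (fun result i =>
    if PySem.Int.mod i 2 = 0 then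
      (if PySem.Int.mod i 3 = 0 then result + i * 3 else result + i * 2)
    else if PySem.Int.mod i 3 = 0 then
      (if PySem.Int.mod i 5 = 0 then result + i * 5 else result + i * 3)
    else if PySem.Int.mod i 5 = 0 then result + i * 5
    else if PySem.Int.mod i 7 = 0 then result + i * 7
    else result + 1) 0

-- ===== PORT B =====
-- _term(res): (coefficient, addend) of the branch taken at any i with i % 210 == res
def pvTerm (res : Int) : Int × Int :=
  if PySem.Int.mod res 2 = 0 then
    (if PySem.Int.mod res 3 = 0 then (3, 0) else (2, 0))
  else if PySem.Int.mod res 3 = 0 then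
    (if PySem.Int.mod res 5 = 0 then (5, 0) else (3, 0))
  else if PySem.Int.mod res 5 = 0 then (5, 0)
  else if PySem.Int.mod res 7 = 0 then (7, 0)
  else (0, 1)

-- _class_total(q, r, res): contribution of all i < n (n = 210*q + r) with i % 210 == res
def pvClassTotal (q r res : Int) : Int :=
  let c := (pvTerm res).1
  let add := (pvTerm res).2
  let k := q + (if res < r then (1 : Int) else 0)
  c * (k * res + 210 * PySem.Int.floordiv (k * (k - 1)) 2) + add * k

def complex_function_alt (n : Int) : Int :=
  if n ≤ 0 then 0
  else
    let q := PySem.Int.floordiv n 210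
    let r := PySem.Int.mod n 210
    (PySem.List.pyRange 0 210 1).foldl (fun total res => total + pvClassTotal q r res) 0

-- ===== PRECONDITION & SPEC =====
def Spec_complex_function (n : Int) (out : Int) : Prop := out = complex_function_alt n
instance (n : Int) (out : Int) : Decidable (Spec_complex_function n out) := by unfold Spec_complex_function; infer_instance

-- ===== CLAIM (what is proved, stated in full; the proofs are below) =====
def Claim_equal_complex_function : Prop := ∀ (n : Int), Dom_complex_function n → Spec_complex_function n (complex_function n)

-- ===== LEMMAS AND PROOFS =====

-- the per-iteration addend of A's loop
def pvStep (i : Int) : Int :=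
  if PySem.Int.mod i 2 = 0 then
    (if PySem.Int.mod i 3 = 0 then i * 3 else i * 2)
  else if PySem.Int.mod i 3 = 0 then
    (if PySem.Int.mod i 5 = 0 then i * 5 else i * 3)
  else if PySem.Int.mod i 5 = 0 then i * 5
  else if PySem.Int.mod i 7 = 0 then i * 7
  else 1

-- B's closed-form sum, as a function of n (its value at 0 is 0)
def pvBsum (n : Int) : Int :=
  ((PySem.List.pyRange 0 210 1).map
    (pvClassTotal (PySem.Int.floordiv n 210) (PySem.Int.mod n 210))).sum

lemma pvA_eq_sum (n : Int) :
    complex_function n = ((PySem.List.pyRange 0 n 1).map pvStep).sum := by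
  unfold complex_function
  refine Eq.trans (PySem.List.foldl_congr_mem _ _ (fun acc i => acc + pvStep i) 0
      (by intro acc x _; beta_reduce; unfold pvStep; split_ifs <;> rfl)) ?_
  rw [PySem.List.foldl_add]
  simp

lemma pvB_eq_bsum (n : Int) (hn : 1 ≤ n) : complex_function_alt n = pvBsum n := by
  unfold complex_function_alt pvBsum
  rw [if_neg (by omega)]
  rw [PySem.List.foldl_add]
  simp

lemma pvMod210_mod (n m : Int) (hm : m = 2 ∨ m = 3 ∨ m = 5 ∨ m = 7) :
    PySem.Int.mod (n % 210) m = 0 ↔ PySem.Int.mod n m = 0 := by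
  rcases hm with h | h | h | h <;> subst h <;>
    rw [PySem.Int.mod_eq_emod_of_pos (by norm_num),
        PySem.Int.mod_eq_emod_of_pos (by norm_num)] <;> omega

lemma pvStep_eq (n : Int) :
    pvStep n = (pvTerm (n % 210)).1 * n + (pvTerm (n % 210)).2 := by
  unfold pvStep pvTerm
  simp only [pvMod210_mod n 2 (by norm_num), pvMod210_mod n 3 (by norm_num),
      pvMod210_mod n 5 (by norm_num), pvMod210_mod n 7 (by norm_num)]
  split_ifs <;> ring

lemma pvTri (q : Int) :
    PySem.Int.floordiv ((q + 1) * q) 2 = PySem.Int.floordiv (q * (q - 1)) 2 + q := by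
  obtain ⟨m, hm⟩ := Int.even_mul_succ_self (q - 1)
  have e2 : q * (q - 1) = m + m := by rw [← hm]; ring
  have e1 : (q + 1) * q = (m + m) + 2 * q := by rw [← e2]; ring
  rw [e1, e2, PySem.Int.floordiv_eq_ediv_of_pos (by norm_num),
      PySem.Int.floordiv_eq_ediv_of_pos (by norm_num)]
  omega

lemma pvClassTotal_k_congr (q r q' r' res : Int)
    (hk : q' + (if res < r' then (1 : Int) else 0) = q + (if res < r then (1 : Int) else 0)) :
    pvClassTotal q' r' res = pvClassTotal q r res := by
  unfold pvClassTotal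
  rw [hk]

lemma pvBsum_succ (n : Int) : pvBsum (n + 1) = pvBsum n + pvStep n := by
  have h210 : (0 : Int) < 210 := by norm_num
  unfold pvBsum
  rw [PySem.Int.floordiv_eq_ediv_of_pos h210, PySem.Int.floordiv_eq_ediv_of_pos h210,
      PySem.Int.mod_eq_emod_of_pos h210, PySem.Int.mod_eq_emod_of_pos h210]
  set q := n / 210 with hq
  set r := n % 210 with hr
  have hr0 : 0 ≤ r := by omega
  have hr1 : r < 210 := by omega
  rw [PySem.List.pyRange_one_append 0 r 210 hr0 (by omega),
      PySem.List.pyRange_one_cons (show r < 210 by omega)]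
  simp only [List.map_append, List.sum_append, List.map_cons, List.sum_cons]
  have hleft : ∀ res ∈ PySem.List.pyRange 0 r 1,
      pvClassTotal ((n + 1) / 210) ((n + 1) % 210) res = pvClassTotal q r res := by
    intro res hres
    rw [PySem.List.mem_pyRange_one] at hres
    exact pvClassTotal_k_congr _ _ _ _ _ (by split_ifs <;> omega)
  have hright : ∀ res ∈ PySem.List.pyRange (r + 1) 210 1,
      pvClassTotal ((n + 1) / 210) ((n + 1) % 210) res = pvClassTotal q r res := by
    intro res hres
    rw [PySem.List.mem_pyRange_one] at hres
    exact pvClassTotal_k_congr _ _ _ _ _ (by split_ifs <;> omega)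
  rw [List.map_congr_left hleft, List.map_congr_left hright]
  have hmid : pvClassTotal ((n + 1) / 210) ((n + 1) % 210) r = pvClassTotal q r r + pvStep n := by
    have hkold : q + (if r < r then (1 : Int) else 0) = q := by simp
    have hknew : (n + 1) / 210 + (if r < (n + 1) % 210 then (1 : Int) else 0) = q + 1 := by
      split_ifs <;> omega
    unfold pvClassTotal
    rw [hknew, hkold]
    show (pvTerm r).1 * ((q + 1) * r + 210 * PySem.Int.floordiv ((q + 1) * ((q + 1) - 1)) 2)
          + (pvTerm r).2 * (q + 1)
        = ((pvTerm r).1 * (q * r + 210 * PySem.Int.floordiv (q * (q - 1)) 2)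
          + (pvTerm r).2 * q) + pvStep n
    have ht : PySem.Int.floordiv ((q + 1) * ((q + 1) - 1)) 2
        = PySem.Int.floordiv (q * (q - 1)) 2 + q := by
      have h := pvTri q
      rwa [show (q + 1) * q = (q + 1) * ((q + 1) - 1) from by ring] at h
    rw [ht, pvStep_eq n, ← hr]
    have hn210 : n = 210 * q + r := by omega
    linear_combination (-(pvTerm r).1) * hn210
  rw [hmid]
  ring

set_option maxRecDepth 8192 in
lemma pvSum_eq_bsum (m : Nat) :
    ((PySem.List.pyRange 0 (m : Int) 1).map pvStep).sum = pvBsum (m : Int) := by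
  induction m with
  | zero =>
      simp only [Nat.cast_zero]
      rw [PySem.List.pyRange_one_eq_nil (by norm_num)]
      simp only [List.map_nil, List.sum_nil]
      decide
  | succ m ih =>
      have hc : ((m + 1 : Nat) : Int) = (m : Int) + 1 := by push_cast; ring
      rw [hc, PySem.List.pyRange_one_succ_right (by positivity),
          List.map_append, List.sum_append, ih, pvBsum_succ (m : Int)]
      simp

-- ===== VERDICT (by name: the statement is the Claim_ definition above) =====
theorem complex_function_spec : Claim_equal_complex_function := by
  intro n _
  unfold Spec_complex_function
  by_cases hn : n ≤ 0
  · unfold complex_function complex_function_alt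
    rw [PySem.List.pyRange_one_eq_nil hn, if_pos hn]
    rfl
  · rw [pvA_eq_sum, pvB_eq_bsum n (by omega)]
    have hm : n = ((n.toNat : Nat) : Int) := by omega
    rw [hm]
    exact pvSum_eq_bsum n.toNat
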